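-- pv_equiv track=rewrite | github.com/camlab-ethz/symbolic-GED | src/vae/compare_models_same_latents.py | _parse_simple_terms
-- ===== SOURCE A (Python) =====
-- from typing import List, Set, Tuple, Dict
--
-- def _parse_simple_terms(expr: str) -> List[Tuple[str, str]]:
--     """Parse expression into (sign, term) pairs.
--
--     Returns: List of (sign, term) where sign is '+' or '-'
--     """
--     if not expr or expr.strip() == '0':
--         return [('+', '0')]
--
--     expr = expr.strip()
--     terms = []
--
--     # Handle first term (might not have sign)
--     i = 0
--     while i < len(expr):
--         if expr[i] in ['+', '-']:
--             sign = expr[i]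
--             i += 1
--             # Skip spaces
--             while i < len(expr) and expr[i].isspace():
--                 i += 1
--             # Find next term
--             start = i
--             while i < len(expr) and expr[i] not in ['+', '-']:
--                 i += 1
--             term = expr[start:i].strip()
--             if term:
--                 terms.append((sign, term))
--         else:
--             # First term (positive by default)
--             start = i
--             while i < len(expr) and expr[i] not in ['+', '-']:
--                 i += 1
--             term = expr[start:i].strip()
--             if term:
--                 terms.append(('+', term))
--
--     return terms if terms else [('+', '0')]
-- ===== SOURCE B (Python) =====
-- def _parse_simple_terms(expr: str):
--     """Parse expression into (sign, term) pairs via a single character fold."""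
--     if not expr or expr.strip() == '0':
--         return [('+', '0')]
--     terms = []
--     sign, buf = '+', ''
--     for ch in expr.strip():
--         if ch in '+-':
--             t = buf.strip()
--             if t:
--                 terms.append((sign, t))
--             sign, buf = ch, ''
--         else:
--             buf += ch
--     t = buf.strip()
--     if t:
--         terms.append((sign, t))
--     return terms if terms else [('+', '0')]
-- ===== Notes on version B (the rewrite author's own statement) =====
-- stated objective: simpler
-- what changed: Replaced A's index-walking state machine (an outer while with two branches, nested space-skipping and term-scanning inner whiles, and slicing) by a single left fold over the characters with a (terms, sign, buffer) accumulator that flushes the stripped buffer at each sign character.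
import Mathlib
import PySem

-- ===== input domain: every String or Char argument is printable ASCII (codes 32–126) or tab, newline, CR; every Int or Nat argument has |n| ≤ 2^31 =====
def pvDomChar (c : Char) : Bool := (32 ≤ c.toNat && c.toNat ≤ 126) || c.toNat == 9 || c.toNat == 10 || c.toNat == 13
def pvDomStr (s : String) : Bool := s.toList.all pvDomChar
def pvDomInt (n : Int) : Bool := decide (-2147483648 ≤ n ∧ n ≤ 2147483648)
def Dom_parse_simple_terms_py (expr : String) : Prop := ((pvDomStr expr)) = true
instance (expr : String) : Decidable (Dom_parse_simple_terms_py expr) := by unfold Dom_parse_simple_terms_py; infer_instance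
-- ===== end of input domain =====

-- B replaces A's index-walking state machine (nested while loops over positions with slicing)
-- by a single left fold over the characters with a (terms, sign, buffer) accumulator; objective: simpler.

-- ===== PORT A =====
-- A-side helpers: the three inner while-loops of _parse_simple_terms, as index recursions.
-- 'while i < len(expr) and expr[i].isspace(): i += 1'
def aSkip (cs : List Char) (i : Nat) : Nat :=
  if h : i < cs.length then
    if PySem.Chars.isspace cs[i] then aSkip cs (i + 1) else i
  else i
termination_by cs.length - i

-- 'while i < len(expr) and expr[i] not in ['+', '-']: i += 1'
def aFind (cs : List Char) (i : Nat) : Nat :=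
  if h : i < cs.length then
    if cs[i] == '+' || cs[i] == '-' then i else aFind cs (i + 1)
  else i
termination_by cs.length - i

theorem aSkip_le (cs : List Char) (i : Nat) : i ≤ aSkip cs i := by
  induction i using aSkip.induct cs with
  | case1 i h hs ih => rw [aSkip]; simp only [h, ↓reduceDIte, hs, if_true]; omega
  | case2 i h hs => rw [aSkip]; simp [h, hs]
  | case3 i h => rw [aSkip]; simp [h]

theorem aFind_le (cs : List Char) (i : Nat) : i ≤ aFind cs i := by
  induction i using aFind.induct cs with
  | case1 i h hs => rw [aFind]; simp [h, hs]
  | case2 i h hs ih => rw [aFind]; simp only [h, ↓reduceDIte, hs, Bool.false_eq_true, if_false]; omega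
  | case3 i h => rw [aFind]; simp [h]

theorem aFind_step (cs : List Char) (i : Nat) (h : i < cs.length)
    (hns : (cs[i] == '+' || cs[i] == '-') = false) : aFind cs i = aFind cs (i + 1) := by
  rw [aFind]; simp [h, hns]

-- the outer 'while i < len(expr)' loop of A
def aLoop (cs : List Char) (i : Nat) (terms : List (String × String)) : List (String × String) :=
  if h : i < cs.length then
    if hs : (cs[i] == '+' || cs[i] == '-') = true then
      -- sign branch
      let sign := cs[i]
      let j := aSkip cs (i + 1)                       -- skip spaces
      let k := aFind cs j                             -- find next term end
      let term := PySem.Chars.strip ((cs.drop j).take (k - j))   -- expr[start:i].strip()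
      aLoop cs k (if term ≠ [] then terms ++ [(String.ofList [sign], String.ofList term)] else terms)
    else
      -- first term (positive by default)
      let k := aFind cs i
      let term := PySem.Chars.strip ((cs.drop i).take (k - i))
      aLoop cs k (if term ≠ [] then terms ++ [("+", String.ofList term)] else terms)
  else terms
termination_by cs.length - i
decreasing_by
  · have h1 := aSkip_le cs (i + 1)
    have h2 := aFind_le cs (aSkip cs (i + 1))
    omega
  · have h1 : i + 1 ≤ aFind cs i := by
      rw [aFind_step cs i h (by simpa using hs)]; exact aFind_le cs (i + 1)
    omega

def parse_simple_terms_py (expr : String) : List (String × String) :=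
  if expr.toList = [] ∨ PySem.Chars.strip expr.toList = ['0'] then [("+", "0")]
  else
    let cs := PySem.Chars.strip expr.toList
    let terms := aLoop cs 0 []
    if terms ≠ [] then terms else [("+", "0")]

-- ===== PORT B =====
-- one fold step of B's loop: flush the buffer at a sign character, otherwise extend it
def bStep (st : List (String × String) × Char × List Char) (c : Char) :
    List (String × String) × Char × List Char :=
  match st with
  | (terms, sign, buf) =>
    if c == '+' || c == '-' then
      let t := PySem.Chars.strip buf
      ((if t ≠ [] then terms ++ [(String.ofList [sign], String.ofList t)] else terms), c, [])
    else (terms, sign, buf ++ [c])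

def parse_simple_terms_py_alt (expr : String) : List (String × String) :=
  if expr.toList = [] ∨ PySem.Chars.strip expr.toList = ['0'] then [("+", "0")]
  else
    let st := (PySem.Chars.strip expr.toList).foldl bStep ([], '+', [])
    let t := PySem.Chars.strip st.2.2
    let terms := if t ≠ [] then st.1 ++ [(String.ofList [st.2.1], String.ofList t)] else st.1
    if terms ≠ [] then terms else [("+", "0")]

-- ===== PRECONDITION & SPEC =====
def Spec_parse_simple_terms_py (expr : String) (out : List (String × String)) : Prop := out = parse_simple_terms_py_alt expr
instance (expr : String) (out : List (String × String)) : Decidable (Spec_parse_simple_terms_py expr out) := by unfold Spec_parse_simple_terms_py; infer_instance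

-- ===== CLAIM (what is proved, stated in full; the proofs are below) =====
def Claim_equal_parse_simple_terms_py : Prop := ∀ (expr : String), Dom_parse_simple_terms_py expr → Spec_parse_simple_terms_py expr (parse_simple_terms_py expr)

-- ===== LEMMAS AND PROOFS =====

-- flushing B's (terms, sign, buffer) state at end of input or at a sign character
def flushPair (ts : List (String × String)) (s : Char) (b : List Char) : List (String × String) :=
  if PySem.Chars.strip b ≠ [] then ts ++ [(String.ofList [s], String.ofList (PySem.Chars.strip b))] else ts

def flushSt (st : List (String × String) × Char × List Char) : List (String × String) :=
  flushPair st.1 st.2.1 st.2.2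

-- finishing B's fold from state (ts, s, []) over the remaining characters l
def Bfin (l : List Char) (s : Char) (ts : List (String × String)) : List (String × String) :=
  flushSt (l.foldl bStep (ts, s, []))

theorem aFind_sign (cs : List Char) (i : Nat) :
    ∀ (h : aFind cs i < cs.length), (cs[aFind cs i] == '+' || cs[aFind cs i] == '-') = true := by
  induction i using aFind.induct cs with
  | case1 i h hs =>
    intro h'
    have e : aFind cs i = i := by rw [aFind]; simp [h, hs]
    simpa [e] using hs
  | case2 i h hs ih =>
    have e : aFind cs i = aFind cs (i + 1) := by rw [aFind]; simp [h, hs]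
    rw [e]; exact ih
  | case3 i h =>
    intro h'
    have e : aFind cs i = i := by rw [aFind]; simp [h]
    exact absurd (e ▸ h') h

theorem aFind_ge_succ (cs : List Char) (i : Nat) (h : i < cs.length)
    (hns : (cs[i] == '+' || cs[i] == '-') = false) : i + 1 ≤ aFind cs i := by
  rw [aFind_step cs i h hns]; exact aFind_le cs (i + 1)

theorem scanEq (cs : List Char) (i : Nat) (ts : List (String × String)) (s : Char) (b : List Char) :
    (cs.drop i).foldl bStep (ts, s, b)
      = (cs.drop (aFind cs i)).foldl bStep (ts, s, b ++ (cs.drop i).take (aFind cs i - i)) := by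
  induction i using aFind.induct cs generalizing b with
  | case1 i h hs =>
    have e : aFind cs i = i := by rw [aFind]; simp [h, hs]
    simp [e]
  | case2 i h hs ih =>
    have hns : (cs[i] == '+' || cs[i] == '-') = false := by simpa using hs
    have e : aFind cs i = aFind cs (i + 1) := aFind_step cs i h hns
    have hge : i + 1 ≤ aFind cs (i + 1) := aFind_le cs (i + 1)
    rw [List.drop_eq_getElem_cons h, List.foldl_cons]
    have step : bStep (ts, s, b) cs[i] = (ts, s, b ++ [cs[i]]) := by simp [bStep, hns]
    rw [step, ih, e]
    have h2 : (cs[i] :: cs.drop (i + 1)).take (aFind cs (i + 1) - i)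
        = cs[i] :: (cs.drop (i + 1)).take (aFind cs (i + 1) - (i + 1)) := by
      have h3 : aFind cs (i + 1) - i = (aFind cs (i + 1) - (i + 1)) + 1 := by omega
      rw [h3, List.take_succ_cons]
    rw [h2]; simp
  | case3 i h =>
    have e : aFind cs i = i := by rw [aFind]; simp [h]
    have : cs.drop i = [] := List.drop_eq_nil_of_le (by omega)
    simp [e, this]

theorem notSign_of_space (c : Char) (h : PySem.Chars.isspace c = true) :
    (c == '+' || c == '-') = false := by
  have h1 : c ≠ '+' := fun e => absurd h (by subst e; decide)
  have h2 : c ≠ '-' := fun e => absurd h (by subst e; decide)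
  simp [h1, h2]

theorem strip_cons_space (c : Char) (x : List Char) (h : PySem.Chars.isspace c = true) :
    PySem.Chars.strip (c :: x) = PySem.Chars.strip x := by
  simp [PySem.Chars.strip, PySem.Chars.lstrip, h]

theorem aFind_skip (cs : List Char) (m : Nat) : aFind cs (aSkip cs m) = aFind cs m := by
  induction m using aSkip.induct cs with
  | case1 m h hs ih =>
    have e : aSkip cs m = aSkip cs (m + 1) := by rw [aSkip]; simp [h, hs]
    rw [e, ih, aFind_step cs m h (notSign_of_space _ hs)]
  | case2 m h hs =>
    have e : aSkip cs m = m := by rw [aSkip]; simp [h, hs]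
    rw [e]
  | case3 m h =>
    have e : aSkip cs m = m := by rw [aSkip]; simp [h]
    rw [e]

theorem strip_skip (cs : List Char) (m : Nat) :
    PySem.Chars.strip ((cs.drop (aSkip cs m)).take (aFind cs m - aSkip cs m))
      = PySem.Chars.strip ((cs.drop m).take (aFind cs m - m)) := by
  induction m using aSkip.induct cs with
  | case1 m h hs ih =>
    have e : aSkip cs m = aSkip cs (m + 1) := by rw [aSkip]; simp [h, hs]
    have ef : aFind cs m = aFind cs (m + 1) := aFind_step cs m h (notSign_of_space _ hs)
    have hge : m + 1 ≤ aFind cs m := aFind_ge_succ cs m h (notSign_of_space _ hs)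
    rw [e, ef, ih, List.drop_eq_getElem_cons h]
    have : (cs[m] :: cs.drop (m + 1)).take (aFind cs (m + 1) - m)
        = cs[m] :: (cs.drop (m + 1)).take (aFind cs (m + 1) - (m + 1)) := by
      have : aFind cs (m + 1) - m = (aFind cs (m + 1) - (m + 1)) + 1 := by omega
      rw [this, List.take_succ_cons]
    rw [this, strip_cons_space _ _ hs]
  | case2 m h hs =>
    have e : aSkip cs m = m := by rw [aSkip]; simp [h, hs]
    rw [e]
  | case3 m h =>
    have e : aSkip cs m = m := by rw [aSkip]; simp [h]
    rw [e]

-- at a landing position k of aFind (sign char or end of input), flushing B's fold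
-- over the tail equals continuing A's loop from k with the flushed terms
theorem strip_nil : PySem.Chars.strip [] = [] := rfl

theorem flushPair_congr (ts : List (String × String)) (s : Char) {b1 b2 : List Char}
    (h : PySem.Chars.strip b1 = PySem.Chars.strip b2) : flushPair ts s b1 = flushPair ts s b2 := by
  simp [flushPair, h]

theorem land (cs : List Char) (k : Nat) (ts : List (String × String)) (s : Char) (b : List Char)
    (hsk : ∀ h : k < cs.length, (cs[k] == '+' || cs[k] == '-') = true)
    (IH : ∀ h : k < cs.length, aLoop cs k (flushPair ts s b) = Bfin (cs.drop (k + 1)) cs[k] (flushPair ts s b)) :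
    flushSt ((cs.drop k).foldl bStep (ts, s, b)) = aLoop cs k (flushPair ts s b) := by
  by_cases h : k < cs.length
  · rw [List.drop_eq_getElem_cons h, List.foldl_cons]
    have step : bStep (ts, s, b) cs[k] = (flushPair ts s b, cs[k], []) := by
      simp [bStep, flushPair, hsk h]
    rw [step, IH h]; rfl
  · rw [List.drop_eq_nil_of_le (by omega)]
    rw [aLoop]; simp [h, flushSt]

theorem sign_entry (n : Nat) : ∀ (cs : List Char) (i : Nat) (ts : List (String × String)),
    cs.length - i ≤ n → ∀ (h : i < cs.length), (cs[i] == '+' || cs[i] == '-') = true →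
    aLoop cs i ts = Bfin (cs.drop (i + 1)) cs[i] ts := by
  induction n with
  | zero => intro cs i ts hn h _; omega
  | succ n ih =>
    intro cs i ts hn h hs
    have eA : aLoop cs i ts
        = aLoop cs (aFind cs (aSkip cs (i + 1)))
            (flushPair ts cs[i]
              ((cs.drop (aSkip cs (i + 1))).take (aFind cs (aSkip cs (i + 1)) - aSkip cs (i + 1)))) := by
      rw [aLoop]; simp only [h, ↓reduceDIte, hs, ↓reduceDIte]; rfl
    rw [eA, aFind_skip, flushPair_congr ts cs[i] (strip_skip cs (i + 1))]
    show _ = flushSt ((cs.drop (i + 1)).foldl bStep (ts, cs[i], []))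
    rw [scanEq cs (i + 1) ts cs[i] [], List.nil_append]
    have hge : i + 1 ≤ aFind cs (i + 1) := aFind_le cs (i + 1)
    refine (land cs (aFind cs (i + 1)) ts cs[i] _ (fun h' => aFind_sign cs (i + 1) h') ?_).symm
    intro h'
    exact ih cs (aFind cs (i + 1)) _ (by omega) h' (aFind_sign cs (i + 1) h')

theorem top_eq (cs : List Char) : aLoop cs 0 [] = Bfin cs '+' [] := by
  match hcs : cs with
  | [] =>
    rw [aLoop]; simp [Bfin, flushSt, flushPair, strip_nil]
  | c :: cs' =>
    have h : 0 < (c :: cs').length := by simp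
    by_cases hs : ((c :: cs')[0] == '+' || (c :: cs')[0] == '-') = true
    · rw [sign_entry (c :: cs').length (c :: cs') 0 [] (by omega) h hs]
      show Bfin cs' _ _ = _
      simp only [Bfin, flushSt]
      have step : bStep ([], '+', []) c = ([], c, []) := by
        simp only [List.getElem_cons_zero] at hs
        simp [bStep, hs, strip_nil]
      rw [List.foldl_cons, step]
      rfl
    · have hns : ((c :: cs')[0] == '+' || (c :: cs')[0] == '-') = false := by simpa using hs
      have eA : aLoop (c :: cs') 0 []
          = aLoop (c :: cs') (aFind (c :: cs') 0)
              (flushPair [] '+' (((c :: cs').drop 0).take (aFind (c :: cs') 0 - 0))) := by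
        rw [aLoop]
        simp only [h, ↓reduceDIte, hns, Bool.false_eq_true, ↓reduceDIte]
        have e1 : String.ofList ['+'] = "+" := rfl
        simp [flushPair, e1]
      rw [eA]
      show _ = flushSt (((c :: cs').drop 0).foldl bStep ([], '+', []))
      rw [scanEq (c :: cs') 0 [] '+' [], List.nil_append]
      refine (land (c :: cs') (aFind (c :: cs') 0) [] '+' _
        (fun h' => aFind_sign (c :: cs') 0 h') ?_).symm
      intro h'
      exact sign_entry (c :: cs').length (c :: cs') (aFind (c :: cs') 0) _ (by omega) h'
        (aFind_sign (c :: cs') 0 h')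

-- ===== VERDICT (by name: the statement is the Claim_ definition above) =====
theorem parse_simple_terms_py_spec : Claim_equal_parse_simple_terms_py := by
  intro expr _
  unfold Spec_parse_simple_terms_py parse_simple_terms_py parse_simple_terms_py_alt
  by_cases hg : expr.toList = [] ∨ PySem.Chars.strip expr.toList = ['0']
  · rw [if_pos hg, if_pos hg]
  · rw [if_neg hg, if_neg hg]
    show (if aLoop (PySem.Chars.strip expr.toList) 0 [] ≠ [] then
        aLoop (PySem.Chars.strip expr.toList) 0 [] else [("+", "0")]) = _
    rw [top_eq]
    rfl
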